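-- pv_equiv track=rewrite | github.com/rohitg00/ai-engineering-from-scratch | phases/14-agent-engineering/28-orchestration-patterns/code/main.py | debate
-- ===== SOURCE A (Python) =====
-- from collections import Counter
-- from typing import Any, Callable
--
-- def classify(text: str) -> str:
--     t = text.lower()
--     if "refund" in t:
--         return "refund"
--     if "crash" in t or "error" in t or "bug" in t:
--         return "bug"
--     if "pricing" in t or "quote" in t:
--         return "sales"
--     return "sales"
--
-- SPECIALISTS: dict[str, Callable[[str], str]] = {
--     "refund": lambda t: f"refund handled: {t[:30]}",
--     "bug":    lambda t: f"bug logged: {t[:30]}",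
--     "sales":  lambda t: f"quote sent: {t[:30]}",
-- }
--
-- def debate(tasks: list[str]) -> tuple[list[str], int]:
--     trace: list[str] = []
--     ops = 0
--     for task in tasks:
--         proposals: list[str] = []
--         for debater in ("alpha", "beta", "gamma"):
--             ops += 1
--             label = classify(task)
--             proposals.append(label)
--             trace.append(f"{debater} proposes {label}")
--         ops += 1
--         convergent = Counter(proposals).most_common(1)[0][0]
--         specialist = SPECIALISTS[convergent]
--         ops += 1
--         trace.append(f"debate converges -> {convergent}: {specialist(task)}")
--     return trace, ops
-- ===== SOURCE B (Python) =====
-- def classify(text: str) -> str: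
--     t = text.lower()
--     if "refund" in t:
--         return "refund"
--     if "crash" in t or "error" in t or "bug" in t:
--         return "bug"
--     return "sales"
--
-- PREFIX = {"refund": "refund handled: ", "bug": "bug logged: ", "sales": "quote sent: "}
--
-- def debate(tasks):
--     trace = []
--     for task in tasks:
--         label = classify(task)
--         trace += [f"{d} proposes {label}" for d in ("alpha", "beta", "gamma")]
--         trace.append(f"debate converges -> {label}: {PREFIX[label]}{task[:30]}")
--     return trace, 5 * len(tasks)
-- ===== Notes on version B (the rewrite author's own statement) =====
-- stated objective: simpler
-- what changed: B classifies each task once and emits the four trace lines from that single label with a static prefix table, dropping the three redundant classify calls, the proposals list and the Counter majority vote, and computes ops as 5*len(tasks) in closed form.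
import Mathlib
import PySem

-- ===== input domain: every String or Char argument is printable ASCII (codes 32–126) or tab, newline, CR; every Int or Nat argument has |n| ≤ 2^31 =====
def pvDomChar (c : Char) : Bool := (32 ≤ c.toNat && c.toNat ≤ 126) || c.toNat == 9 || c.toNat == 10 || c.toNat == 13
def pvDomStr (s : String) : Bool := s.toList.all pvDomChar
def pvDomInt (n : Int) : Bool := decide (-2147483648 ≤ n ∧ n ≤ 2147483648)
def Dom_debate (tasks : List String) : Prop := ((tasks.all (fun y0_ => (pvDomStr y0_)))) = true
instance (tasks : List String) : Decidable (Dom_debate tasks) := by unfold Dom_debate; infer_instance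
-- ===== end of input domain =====

-- B replaces A's three redundant classify calls, proposals list and Counter vote per task
-- by one classify call and a static prefix table; ops becomes the closed form 5*len(tasks). Objective: simpler.

-- ===== PORT A =====
def classifyA (text : String) : String :=
  let t := PySem.Str.lower text
  if PySem.Str.isIn "refund" t then "refund"
  else if PySem.Str.isIn "crash" t || PySem.Str.isIn "error" t || PySem.Str.isIn "bug" t then "bug"
  else if PySem.Str.isIn "pricing" t || PySem.Str.isIn "quote" t then "sales"
  else "sales"

-- SPECIALISTS[label] applied to t: literal dict of three lambdas, first-match lookup.
-- The final else is the "sales" entry; classifyA only ever produces the three keys, so no KeyError arises.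
def specialistsApplyA (label t : String) : String :=
  if label == "refund" then "refund handled: " ++ PySem.Str.slice t none (some 30)
  else if label == "bug" then "bug logged: " ++ PySem.Str.slice t none (some 30)
  else "quote sent: " ++ PySem.Str.slice t none (some 30)

-- Counter(proposals).most_common(1)[0][0]: count, order by count descending (stable), take the first.
-- proposals always has 3 elements here, so the [0] never raises; the headD default is unreachable.
def mostCommon1A (proposals : List String) : String :=
  ((PySem.List.sorted (PySem.Dict.counter proposals).items (fun p => p.2) true).headD ("", 0)).1

def debate (tasks : List String) : List String × Int :=
  tasks.foldl (fun st task =>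
    let inner := ["alpha", "beta", "gamma"].foldl
      (fun (s : Int × List String × List String) debater =>
        let ops := s.1 + 1
        let label := classifyA task
        (ops, s.2.1 ++ [label], s.2.2 ++ [debater ++ " proposes " ++ label]))
      (st.2, [], st.1)
    let ops := inner.1 + 1
    let convergent := mostCommon1A inner.2.1
    let ops := ops + 1
    (inner.2.2 ++ ["debate converges -> " ++ convergent ++ ": " ++ specialistsApplyA convergent task], ops))
    ([], 0)

-- ===== PORT B =====
def classifyB (text : String) : String :=
  let t := PySem.Str.lower text
  if PySem.Str.isIn "refund" t then "refund"
  else if PySem.Str.isIn "crash" t || PySem.Str.isIn "error" t || PySem.Str.isIn "bug" t then "bug"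
  else "sales"

-- PREFIX[label]: literal three-key dict; label is always one of its keys.
def prefixB (label : String) : String :=
  if label == "refund" then "refund handled: "
  else if label == "bug" then "bug logged: "
  else "quote sent: "

def debate_alt (tasks : List String) : List String × Int :=
  let trace := tasks.foldl (fun tr task =>
    let label := classifyB task
    tr ++ ((["alpha", "beta", "gamma"].map (fun d => d ++ " proposes " ++ label))
       ++ ["debate converges -> " ++ label ++ ": " ++ prefixB label ++ PySem.Str.slice task none (some 30)])) []
  (trace, 5 * (tasks.length : Int))

-- ===== PRECONDITION & SPEC =====
def Spec_debate (tasks : List String) (out : List String × Int) : Prop := out = debate_alt tasks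
instance (tasks : List String) (out : List String × Int) : Decidable (Spec_debate tasks out) := by unfold Spec_debate; infer_instance

-- ===== CLAIM (what is proved, stated in full; the proofs are below) =====
def Claim_equal_debate : Prop := ∀ (tasks : List String), Dom_debate tasks → Spec_debate tasks (debate tasks)

-- ===== LEMMAS AND PROOFS =====
-- the four trace lines B emits for one task
def linesB (task : String) : List String :=
  (["alpha", "beta", "gamma"].map (fun d => d ++ " proposes " ++ classifyB task))
    ++ ["debate converges -> " ++ classifyB task ++ ": " ++ prefixB (classifyB task)
          ++ PySem.Str.slice task none (some 30)]

theorem classify_eq (t : String) : classifyA t = classifyB t := by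
  unfold classifyA classifyB
  dsimp only
  split_ifs <;> rfl

theorem classifyB_cases (t : String) :
    classifyB t = "refund" ∨ classifyB t = "bug" ∨ classifyB t = "sales" := by
  unfold classifyB
  dsimp only
  split_ifs <;> simp

theorem mc_refund : mostCommon1A ["refund", "refund", "refund"] = "refund" := by decide
theorem mc_bug : mostCommon1A ["bug", "bug", "bug"] = "bug" := by decide
theorem mc_sales : mostCommon1A ["sales", "sales", "sales"] = "sales" := by decide

theorem debate_alt_eq (tasks : List String) :
    debate_alt tasks = (tasks.flatMap linesB, 5 * (tasks.length : Int)) := by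
  unfold debate_alt linesB
  rw [PySem.List.foldl_append_eq_flatMap]
  simp

-- one body of A's outer loop appends B's four lines and adds 5 ops
theorem step_eq (tr : List String) (ops : Int) (task : String) :
    (let inner := ["alpha", "beta", "gamma"].foldl
        (fun (s : Int × List String × List String) debater =>
          let o := s.1 + 1
          let label := classifyA task
          (o, s.2.1 ++ [label], s.2.2 ++ [debater ++ " proposes " ++ label]))
        (ops, [], tr)
      let o := inner.1 + 1
      let convergent := mostCommon1A inner.2.1
      let o := o + 1
      (inner.2.2 ++ ["debate converges -> " ++ convergent ++ ": " ++ specialistsApplyA convergent task], o))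
    = (tr ++ linesB task, ops + 5) := by
  rcases classifyB_cases task with h | h | h <;>
    simp [List.foldl, linesB, classify_eq, h, mc_refund, mc_bug, mc_sales,
          specialistsApplyA, prefixB, List.append_assoc] <;>
    exact ⟨by rw [← String.append_assoc]; simp, by ring⟩

theorem loop_eq (tasks : List String) (tr : List String) (ops : Int) :
    tasks.foldl (fun st task =>
      let inner := ["alpha", "beta", "gamma"].foldl
        (fun (s : Int × List String × List String) debater =>
          let o := s.1 + 1
          let label := classifyA task
          (o, s.2.1 ++ [label], s.2.2 ++ [debater ++ " proposes " ++ label]))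
        (st.2, [], st.1)
      let o := inner.1 + 1
      let convergent := mostCommon1A inner.2.1
      let o := o + 1
      (inner.2.2 ++ ["debate converges -> " ++ convergent ++ ": " ++ specialistsApplyA convergent task], o))
      (tr, ops)
    = (tr ++ tasks.flatMap linesB, ops + 5 * tasks.length) := by
  induction tasks generalizing tr ops with
  | nil => simp
  | cons t ts ih =>
    rw [List.foldl_cons, step_eq tr ops t, ih]
    refine Prod.ext ?_ ?_
    · simp [List.append_assoc]
    · push_cast [List.length_cons]; ring

-- ===== VERDICT (by name: the statement is the Claim_ definition above) =====
theorem debate_spec : Claim_equal_debate := by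
  intro tasks _
  unfold Spec_debate debate
  rw [loop_eq, debate_alt_eq]
  simp
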